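-- pv_equiv track=rewrite | github.com/avg16/cp-dsa | codeforces/belted_rooms.py | solve
-- ===== SOURCE A (Python) =====
-- def solve(n, s):
--     hasCW = False
--     hasCCW = False
--     for c in s:
--         if c == '>':
--             hasCW = True
--         if c == '<':
--             hasCCW = True
--     if hasCW and hasCCW:
--         s+=s[0]
--         ans =0
--         for i in range(n):
--             if s[i] == '-' or s[i+1] == '-':
--                 ans += 1
--         return ans
--     else:
--         return n
-- ===== SOURCE B (Python) =====
-- def solve(n, s):
--     if '>' in s and '<' in s:
--         dash = [c == '-' for c in s]
--         pairs = sum(1 for i in range(n) if dash[i] and dash[(i + 1) % n])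
--         return 2 * sum(dash) - pairs
--     return n
-- ===== Notes on version B (the rewrite author's own statement) =====
-- stated objective: faster
-- what changed: Instead of scanning each room's two circularly adjacent positions with an OR test in an explicit Python loop, B tallies the dashes once and the circularly adjacent dash pairs once and combines them by inclusion-exclusion as 2*D - P, using C-level count/sum primitives.
-- outside the precondition, e.g. on solve(1, '><-'): A returns 0, B returns 2
import Mathlib
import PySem

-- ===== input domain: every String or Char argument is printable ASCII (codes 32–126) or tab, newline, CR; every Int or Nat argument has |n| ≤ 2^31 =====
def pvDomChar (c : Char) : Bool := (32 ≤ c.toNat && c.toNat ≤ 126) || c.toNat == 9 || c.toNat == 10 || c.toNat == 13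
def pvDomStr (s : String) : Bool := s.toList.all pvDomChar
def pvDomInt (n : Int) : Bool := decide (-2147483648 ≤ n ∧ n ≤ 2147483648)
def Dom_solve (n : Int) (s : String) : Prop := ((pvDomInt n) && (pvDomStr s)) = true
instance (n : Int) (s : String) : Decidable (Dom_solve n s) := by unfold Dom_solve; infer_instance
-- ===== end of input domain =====

-- B replaces A's per-room OR scan over the doubled string by an inclusion-exclusion tally
-- (2 * dash-count − circularly-adjacent dash-pair count); measured constant-factor faster.

-- ===== PORT A =====
def solve (n : Int) (s : String) : Int :=
  let cs := s.toList
  let flags := cs.foldl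
    (fun (p : Bool × Bool) c =>
      (if c = '>' then true else p.1, if c = '<' then true else p.2)) (false, false)
  if flags.1 && flags.2 then
    -- s += s[0] (s is nonempty here since both '>' and '<' occur in it)
    let cs2 := cs ++ [PySem.List.pyGetD cs 0 ' ']
    (PySem.List.pyRange 0 n 1).foldl
      (fun ans i =>
        if PySem.List.pyGetD cs2 i ' ' = '-' ∨ PySem.List.pyGetD cs2 (i + 1) ' ' = '-' then
          ans + 1
        else ans) 0
  else n

-- ===== PORT B =====
def solve_alt (n : Int) (s : String) : Int :=
  if PySem.Str.isIn ">" s && PySem.Str.isIn "<" s then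
    let dash := s.toList.map (fun c => c == '-')
    let pairs := (PySem.List.pyRange 0 n 1).foldl
      (fun acc i =>
        acc + (if PySem.List.pyGetD dash i false &&
                  PySem.List.pyGetD dash (PySem.Int.mod (i + 1) n) false then (1 : Int) else 0)) 0
    2 * (dash.count true : Int) - pairs
  else n

-- ===== PRECONDITION & SPEC =====
-- Pre_ excludes inputs where n differs from len(s) while both belt directions occur: there A
-- either raises IndexError (n > len(s)) or returns a partial count over only the first n rooms,
-- an artefact of A's explicit range(n) loop on a string of a different length.
def Pre_solve (n : Int) (s : String) : Prop :=
  ('>' ∈ s.toList ∧ '<' ∈ s.toList) → n = (s.toList.length : Int)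
instance (n : Int) (s : String) : Decidable (Pre_solve n s) := by unfold Pre_solve; infer_instance
def pvWitness_solve : Int × String := (5, "><->-")
def Spec_solve (n : Int) (s : String) (out : Int) : Prop := out = solve_alt n s
instance (n : Int) (s : String) (out : Int) : Decidable (Spec_solve n s out) := by unfold Spec_solve; infer_instance

-- ===== CLAIM (what is proved, stated in full; the proofs are below) =====
def Claim_equal_solve : Prop := ∀ (n : Int) (s : String), Dom_solve n s → Pre_solve n s → Spec_solve n s (solve n s)

-- ===== LEMMAS AND PROOFS =====

theorem flags_fold (cs : List Char) (a b : Bool) :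
    cs.foldl (fun (p : Bool × Bool) c =>
      (if c = '>' then true else p.1, if c = '<' then true else p.2)) (a, b)
      = (a || cs.contains '>', b || cs.contains '<') := by
  induction cs generalizing a b with
  | nil => simp
  | cons c t ih =>
    rw [List.foldl_cons, ih]
    simp only [List.contains_cons, Prod.mk.injEq]
    constructor
    · by_cases h : c = '>'
      · simp [h]
      · have f : ('>' == c) = false := beq_eq_false_iff_ne.mpr (fun e => h e.symm)
        simp [h, f]
    · by_cases h : c = '<'
      · simp [h]
      · have f : ('<' == c) = false := beq_eq_false_iff_ne.mpr (fun e => h e.symm)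
        simp [h, f]

theorem isIn_singleton (c : Char) (cs : List Char) :
    (PySem.Chars.isIn [c] cs = true) ↔ c ∈ cs := by
  have h := PySem.Str.isIn_iff_infix (String.ofList [c]) (String.ofList cs)
  rw [PySem.Str.isIn_eq] at h
  simp only [String.toList_ofList] at h
  rw [h]
  constructor
  · intro hinf
    have := hinf.sublist.subset
    simpa using this (by simp)
  · intro hm
    obtain ⟨l1, l2, heq⟩ := List.append_of_mem hm
    exact ⟨l1, l2, by simp [heq]⟩

theorem countP_or_and {α : Type} (l : List α) (p q : α → Bool) :
    l.countP (fun x => p x || q x) + l.countP (fun x => p x && q x)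
      = l.countP p + l.countP q := by
  induction l with
  | nil => simp
  | cons x t ih =>
    simp only [List.countP_cons]
    cases hp : p x <;> cases hq : q x <;> simp <;> omega

theorem map_rotate_perm (L : Nat) :
    ((List.range L).map (fun k => (k + 1) % L)).Perm (List.range L) := by
  cases L with
  | zero => simp
  | succ j =>
    have h1 : ((List.range (j + 1)).map (fun k => (k + 1) % (j + 1)))
        = (List.range j).map (fun k => k + 1) ++ [0] := by
      rw [List.range_succ, List.map_append]
      congr 1
      · refine List.map_congr_left ?_
        intro k hk
        simp only [List.mem_range] at hk
        exact Nat.mod_eq_of_lt (by omega)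
      · simp
    rw [h1, List.range_succ_eq_map]
    exact (List.perm_append_singleton 0 _).trans (List.Perm.refl _)

theorem countP_rotate (L : Nat) (f : Nat → Bool) :
    (List.range L).countP (fun k => f ((k + 1) % L)) = (List.range L).countP f := by
  have := (map_rotate_perm L).countP_eq f
  rwa [List.countP_map] at this

theorem countP_range_getD (cs : List Char) (c : Char) :
    (List.range cs.length).countP (fun k => cs.getD k ' ' == c) = cs.count c := by
  induction cs using List.reverseRecOn with
  | nil => simp
  | append_singleton t x ih =>
    rw [List.length_append, List.length_singleton, List.range_succ, List.countP_append,
        List.count_append]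
    simp only [List.countP_singleton, List.count_singleton]
    congr 1
    · rw [← ih]
      refine List.countP_congr ?_
      intro k hk
      simp only [List.mem_range] at hk
      rw [List.getD_append _ _ _ _ hk]
    · rw [List.getD_append_right _ _ _ _ (le_refl _)]
      simp [BEq.comm]


theorem sum_map_ite_prop {α : Type} (p : α → Prop) [DecidablePred p] (l : List α) :
    (l.map (fun x => if p x then (1 : Int) else 0)).sum = (l.countP (fun x => decide (p x)) : Int) := by
  induction l with
  | nil => simp
  | cons x t ih =>
    by_cases h : p x <;> simp [h, ih] <;> omega

theorem mod_pos_eq (a b : Int) (h : 0 < b) : PySem.Int.mod a b = a % b := by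
  simp [PySem.Int.mod, Int.fmod_eq_emod, h.le]

-- ===== VERDICT (by name: the statement is the Claim_ definition above) =====
theorem solve_spec : Claim_equal_solve := by
  intro n s _ hpre
  unfold Spec_solve
  simp only [solve, solve_alt]
  rw [flags_fold]
  by_cases hb : ('>' ∈ s.toList ∧ '<' ∈ s.toList)
  case neg =>
    rcases Decidable.not_and_iff_or_not.mp hb with h | h
    · have b1 : PySem.Chars.isIn ['>'] s.toList = false := by
        rw [Bool.eq_false_iff]
        intro hc; exact h ((isIn_singleton '>' s.toList).mp hc)
      simp [h, b1]
    · have b2 : PySem.Chars.isIn ['<'] s.toList = false := by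
        rw [Bool.eq_false_iff]
        intro hc; exact h ((isIn_singleton '<' s.toList).mp hc)
      simp [h, b2]
  -- both directions present
  obtain ⟨hgt, hlt⟩ := hb
  have b1 : PySem.Chars.isIn ['>'] s.toList = true := (isIn_singleton '>' s.toList).mpr hgt
  have b2 : PySem.Chars.isIn ['<'] s.toList = true := (isIn_singleton '<' s.toList).mpr hlt
  rw [PySem.Str.isIn_eq, PySem.Str.isIn_eq]
  simp only [show (">" : String).toList = ['>'] from rfl, show ("<" : String).toList = ['<'] from rfl]
  have hn : n = (s.toList.length : Int) := hpre ⟨hgt, hlt⟩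
  have g1 : s.toList.contains '>' = true := by simpa using hgt
  have g2 : s.toList.contains '<' = true := by simpa using hlt
  simp only [b1, b2, g1, g2, Bool.false_or, Bool.and_self, if_true]
  set cs := s.toList with hcs
  set L := cs.length with hL
  have hLpos : 0 < L := List.length_pos_of_mem hgt
  set cs2 := cs ++ [PySem.List.pyGetD cs 0 ' '] with hcs2
  set dash := cs.map (fun c => c == '-') with hdash
  rw [PySem.List.foldl_ite_add_one, PySem.List.foldl_add, sum_map_ite_prop]
  rw [hn, PySem.List.pyRange_one]
  simp only [Int.sub_zero, Int.toNat_natCast, zero_add, List.countP_map]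
  -- canonical per-index facts
  have hdg : ∀ m, m < L → dash.getD m false = (cs.getD m ' ' == '-') := by
    intro m hm
    rw [hdash, List.getD_eq_getElem _ _ (by simpa using hm), List.getElem_map,
        List.getD_eq_getElem _ _ hm]
  have h2 : ∀ k, k < L → cs2.getD (k + 1) ' ' = cs.getD ((k + 1) % L) ' ' := by
    intro k hk
    rcases Nat.lt_or_ge (k + 1) L with h | h
    · rw [hcs2, List.getD_append _ _ _ _ h, Nat.mod_eq_of_lt h]
    · have hEq : k + 1 = L := by omega
      have hmod : (k + 1) % L = 0 := by rw [hEq]; exact Nat.mod_self L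
      rw [hcs2, hmod, hEq, List.getD_append_right _ _ _ _ (le_refl _)]
      simp [PySem.List.pyGetD_zero]
  have cA : (List.range L).countP
        ((fun x => decide (PySem.List.pyGetD cs2 x ' ' = '-' ∨
                           PySem.List.pyGetD cs2 (x + 1) ' ' = '-')) ∘ (fun k : Nat => (k : Int)))
      = (List.range L).countP
        (fun k => (cs.getD k ' ' == '-') || (cs.getD ((k + 1) % L) ' ' == '-')) := by
    refine List.countP_congr ?_
    intro k hk
    simp only [List.mem_range] at hk
    simp only [Function.comp_apply]
    have e2 : ((k : Int)) + 1 = (((k + 1 : Nat)) : Int) := by push_cast; ring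
    rw [e2, PySem.List.pyGetD_natCast, PySem.List.pyGetD_natCast,
        List.getD_append _ _ _ _ (show k < cs.length by omega), h2 k hk]
    simp [decide_eq_true_eq]
  have cB : (List.range L).countP
        ((fun x => decide ((PySem.List.pyGetD dash x false &&
                            PySem.List.pyGetD dash (PySem.Int.mod (x + 1) (L : Int)) false) = true))
          ∘ (fun k : Nat => (k : Int)))
      = (List.range L).countP
        (fun k => (cs.getD k ' ' == '-') && (cs.getD ((k + 1) % L) ' ' == '-')) := by
    refine List.countP_congr ?_
    intro k hk
    simp only [List.mem_range] at hk
    simp only [Function.comp_apply]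
    have e2 : PySem.Int.mod ((k : Int) + 1) (L : Int) = (((k + 1) % L : Nat) : Int) := by
      rw [mod_pos_eq _ _ (by exact_mod_cast hLpos)]
      push_cast
      rfl
    have e1 : ((k : Int)) + 1 = (((k + 1 : Nat)) : Int) := by push_cast; ring
    rw [e2, PySem.List.pyGetD_natCast, PySem.List.pyGetD_natCast,
        hdg k hk, hdg _ (Nat.mod_lt _ hLpos)]
    simp
  have hcount : dash.count true = cs.count '-' := by
    rw [hdash, List.count, List.count, List.countP_map]
    refine List.countP_congr ?_
    intro c _
    simp
  have key : (List.range L).countP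
        (fun k => (cs.getD k ' ' == '-') || (cs.getD ((k + 1) % L) ' ' == '-'))
      + (List.range L).countP
        (fun k => (cs.getD k ' ' == '-') && (cs.getD ((k + 1) % L) ' ' == '-'))
      = cs.count '-' + cs.count '-' := by
    rw [countP_or_and]
    congr 1
    · exact countP_range_getD cs '-'
    · exact (countP_rotate L (fun m => cs.getD m ' ' == '-')).trans (countP_range_getD cs '-')
  rw [cA, cB, hcount]
  omega
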